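-- pv_equiv track=rewrite | github.com/karentng/coldeportes | entidades/forms.py | get_campos_quitar
-- ===== SOURCE A (Python) =====
-- def get_campos_quitar(campos):
--     all_campos = ['centros','escenarios','deportistas','personal_apoyo','dirigentes','cajas','selecciones','centros_biomedicos','normas','escuelas_deportivas','noticias']
--     for campo in campos:
--         try:
--             del all_campos[all_campos.index(campo)]
--         except ValueError:
--             pass
--     return (all_campos)
-- ===== SOURCE B (Python) =====
-- def get_campos_quitar(campos):
--     all_campos = ['centros','escenarios','deportistas','personal_apoyo','dirigentes','cajas','selecciones','centros_biomedicos','normas','escuelas_deportivas','noticias']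
--     return [c for c in all_campos if c not in campos]
-- ===== Notes on version B (the rewrite author's own statement) =====
-- stated objective: simpler
-- what changed: Instead of mutating the base list by repeated index-search-and-delete per requested name, B makes one filtering pass over the fixed base list keeping names not in campos.
import Mathlib
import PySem

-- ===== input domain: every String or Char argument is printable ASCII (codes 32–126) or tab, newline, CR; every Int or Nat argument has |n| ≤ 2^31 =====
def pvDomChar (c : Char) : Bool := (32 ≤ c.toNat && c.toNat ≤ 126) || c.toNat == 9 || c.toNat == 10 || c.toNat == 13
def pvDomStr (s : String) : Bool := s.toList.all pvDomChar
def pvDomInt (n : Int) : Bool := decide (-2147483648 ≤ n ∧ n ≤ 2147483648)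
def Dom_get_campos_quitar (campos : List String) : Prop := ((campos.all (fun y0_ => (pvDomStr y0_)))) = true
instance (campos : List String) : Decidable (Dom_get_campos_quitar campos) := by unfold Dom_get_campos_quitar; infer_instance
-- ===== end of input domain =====

-- ===== PORT A =====
-- base list literal, shared name for readability only
def pvAllCampos : List String := ["centros","escenarios","deportistas","personal_apoyo","dirigentes","cajas","selecciones","centros_biomedicos","normas","escuelas_deportivas","noticias"]

-- A: for campo in campos: try del all_campos[all_campos.index(campo)] except ValueError: pass
def get_campos_quitar (campos : List String) : List String :=
  campos.foldl (fun all_campos campo =>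
    match PySem.List.index? all_campos campo with
    | some i => all_campos.eraseIdx i   -- del all_campos[i]
    | none => all_campos)               -- ValueError: pass
    pvAllCampos

-- ===== PORT B =====
-- B: [c for c in all_campos if c not in campos]
def get_campos_quitar_alt (campos : List String) : List String :=
  pvAllCampos.filter (fun c => !campos.contains c)

-- ===== PRECONDITION & SPEC =====
def Spec_get_campos_quitar (campos : List String) (out : List String) : Prop := out = get_campos_quitar_alt campos
instance (campos : List String) (out : List String) : Decidable (Spec_get_campos_quitar campos out) := by unfold Spec_get_campos_quitar; infer_instance

-- ===== CLAIM (what is proved, stated in full; the proofs are below) =====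
def Claim_equal_get_campos_quitar : Prop := ∀ (campos : List String), Dom_get_campos_quitar campos → Spec_get_campos_quitar campos (get_campos_quitar campos)

-- ===== LEMMAS AND PROOFS =====

-- one deletion step of A equals List.erase
theorem pv_step_eq_erase (acc : List String) (v : String) :
    (match PySem.List.index? acc v with
     | some i => acc.eraseIdx i
     | none => acc) = acc.erase v := by
  induction acc with
  | nil => simp [PySem.List.index?]
  | cons x xs ih =>
    by_cases hx : x = v
    · subst hx; rw [PySem.List.index?_cons_self]; simp
    · rw [PySem.List.index?_cons_of_ne xs hx,
          List.erase_cons_tail (by simpa using hx)]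
      have ihx := ih
      cases h : PySem.List.index? xs v with
      | none => rw [h] at ihx; simp [← ihx]
      | some i => rw [h] at ihx; simp [← ihx]

theorem pv_foldl_erase_eq_filter (l : List String) (acc : List String) (hnd : acc.Nodup) :
    l.foldl (fun a v => a.erase v) acc = acc.filter (fun c => !l.contains c) := by
  induction l generalizing acc with
  | nil => simp
  | cons a t ih =>
    simp only [List.foldl_cons]
    rw [ih _ (hnd.erase a), List.Nodup.erase_eq_filter hnd a, List.filter_filter]
    apply List.filter_congr
    intro c _
    by_cases hca : c = a <;> simp [hca]

-- ===== VERDICT (by name: the statement is the Claim_ definition above) =====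
theorem get_campos_quitar_spec : Claim_equal_get_campos_quitar := by
  intro campos _
  unfold Spec_get_campos_quitar get_campos_quitar get_campos_quitar_alt
  have h : ∀ (a : List String) (v : String),
      (fun all_campos campo =>
        match PySem.List.index? all_campos campo with
        | some i => all_campos.eraseIdx i
        | none => all_campos) a v = a.erase v := fun a v => pv_step_eq_erase a v
  rw [show (fun (all_campos : List String) (campo : String) =>
      match PySem.List.index? all_campos campo with
      | some i => all_campos.eraseIdx i
      | none => all_campos) = (fun a v => a.erase v) from funext fun a => funext fun v => h a v]
  exact pv_foldl_erase_eq_filter campos pvAllCampos (by decide)
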